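-- pv_equiv track=rewrite | github.com/Yukingce/RecSystem | MiniOneRec/RL_Reward_model/RL_DIN_reward/data_utils.py | build_sid_vocab
-- ===== SOURCE A (Python) =====
-- from typing import Dict, List, Sequence, Tuple
--
-- PAD_TOKEN = "<PAD>"
--
-- UNK_TOKEN = "<UNK>"
--
-- PAD_ID = 0
--
-- UNK_ID = 1
--
-- def build_sid_vocab(rows: Sequence[Tuple[List[str], str]]) -> Dict[str, int]:
--     sid2id = {PAD_TOKEN: PAD_ID, UNK_TOKEN: UNK_ID}
--     for history, target in rows:
--         for sid in history:
--             if sid not in sid2id: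
--                 sid2id[sid] = len(sid2id)
--         if target not in sid2id:
--             sid2id[target] = len(sid2id)
--     return sid2id
-- ===== SOURCE B (Python) =====
-- PAD_TOKEN = "<PAD>"
-- UNK_TOKEN = "<UNK>"
-- PAD_ID = 0
-- UNK_ID = 1
--
-- def build_sid_vocab(rows):
--     stream = []
--     for history, target in rows:
--         stream.extend(history)
--         stream.append(target)
--     uniq = [s for s in dict.fromkeys(stream) if s != PAD_TOKEN and s != UNK_TOKEN]
--     return dict([(PAD_TOKEN, PAD_ID), (UNK_TOKEN, UNK_ID)]
--                 + [(s, i) for i, s in enumerate(uniq, 2)])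
-- ===== Notes on version B (the rewrite author's own statement) =====
-- stated objective: alternative
-- what changed: Replaces A's single interleaved check-and-insert dict loop by three separate passes: flatten all tokens into one stream, dedup it in first-seen order with dict.fromkeys while dropping the PAD/UNK sentinels, then number the unique tokens from 2 with enumerate and prepend the two fixed sentinel entries.
import Mathlib
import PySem

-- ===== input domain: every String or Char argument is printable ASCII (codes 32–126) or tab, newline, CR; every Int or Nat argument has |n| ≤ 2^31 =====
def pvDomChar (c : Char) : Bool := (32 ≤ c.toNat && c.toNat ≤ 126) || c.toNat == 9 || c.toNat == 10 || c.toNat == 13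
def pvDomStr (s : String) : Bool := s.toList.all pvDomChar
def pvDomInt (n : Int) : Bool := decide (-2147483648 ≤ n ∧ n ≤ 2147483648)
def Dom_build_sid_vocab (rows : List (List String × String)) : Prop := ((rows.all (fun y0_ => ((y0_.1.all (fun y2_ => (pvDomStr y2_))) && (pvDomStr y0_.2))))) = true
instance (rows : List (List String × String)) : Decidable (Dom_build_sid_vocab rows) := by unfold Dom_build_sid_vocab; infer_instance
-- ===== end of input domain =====

-- B replaces A's interleaved check-and-insert dict loop by flatten → ordered dedup (dropping the sentinels) → numbering from 2; alternative decomposition, same cost.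


-- ===== PORT A =====
-- `if sid not in sid2id: sid2id[sid] = len(sid2id)`
def pvStepA (d : PySem.Dict String Int) (sid : String) : PySem.Dict String Int :=
  if d.contains sid then d else d.insert sid (d.size : Int)

def build_sid_vocab (rows : List (List String × String)) : List (String × Int) :=
  (rows.foldl (fun d r => pvStepA (r.1.foldl pvStepA d) r.2)
    (PySem.Dict.ofList [("<PAD>", 0), ("<UNK>", 1)])).items

-- ===== PORT B =====
def build_sid_vocab_alt (rows : List (List String × String)) : List (String × Int) :=
  let stream := rows.foldl (fun st r => st ++ r.1 ++ [r.2]) []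
  let uniq := (PySem.List.dedup stream).filter (fun s => s != "<PAD>" && s != "<UNK>")
  [("<PAD>", (0 : Int)), ("<UNK>", 1)] ++
    (PySem.List.enumerate uniq 2).map (fun p => (p.2, p.1))

-- ===== PRECONDITION & SPEC =====
def Spec_build_sid_vocab (rows : List (List String × String)) (out : List (String × Int)) : Prop := out = build_sid_vocab_alt rows
instance (rows : List (List String × String)) (out : List (String × Int)) : Decidable (Spec_build_sid_vocab rows out) := by unfold Spec_build_sid_vocab; infer_instance

-- ===== CLAIM (what is proved, stated in full; the proofs are below) =====
def Claim_equal_build_sid_vocab : Prop := ∀ (rows : List (List String × String)), Dom_build_sid_vocab rows → Spec_build_sid_vocab rows (build_sid_vocab rows)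

-- ===== LEMMAS AND PROOFS =====

-- first-seen-unique tokens of `toks` whose key is not already in `seen`, in order
def pvFresh (seen : List String) : List String → List String
  | [] => []
  | s :: ss => if seen.contains s then pvFresh seen ss else s :: pvFresh (seen ++ [s]) ss

-- number a list of tokens consecutively starting at n
def pvNumb (n : Int) : List String → List (String × Int)
  | [] => []
  | s :: ss => (s, n) :: pvNumb (n + 1) ss

theorem pvFresh_cons_mem (seen : List String) (s : String) (ss : List String)
    (h : seen.contains s = true) : pvFresh seen (s :: ss) = pvFresh seen ss := by
  simp only [pvFresh, h, if_true]

theorem pvFresh_cons_not_mem (seen : List String) (s : String) (ss : List String)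
    (h : seen.contains s = false) :
    pvFresh seen (s :: ss) = s :: pvFresh (seen ++ [s]) ss := by
  simp only [pvFresh, h, Bool.false_eq_true, if_false]

-- A's fold over any token list, from any dict whose keys are Nodup, appends the fresh tokens numbered from d.size
theorem pvFoldA (toks : List String) (d : PySem.Dict String Int) (hnd : d.keys.Nodup) :
    (toks.foldl pvStepA d).items = d.items ++ pvNumb (d.size : Int) (pvFresh d.keys toks) := by
  induction toks generalizing d with
  | nil => simp [pvFresh, pvNumb]
  | cons s ss ih =>
    by_cases h : d.contains s = true
    · have hm : d.keys.contains s = true := by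
        simpa [List.contains_iff_mem] using (PySem.Dict.contains_iff_mem_keys d s).mp h
      simp only [List.foldl_cons, pvStepA, h, if_true, pvFresh_cons_mem _ _ _ hm]
      exact ih d hnd
    · have h' : d.contains s = false := by simpa using h
      have hm : d.keys.contains s = false := by
        rcases hc : d.keys.contains s with _ | _
        · rfl
        · exact absurd ((PySem.Dict.contains_iff_mem_keys d s).mpr
            (by simpa [List.contains_iff_mem] using hc)) h
      simp only [List.foldl_cons, pvStepA, h', Bool.false_eq_true, if_false,
        pvFresh_cons_not_mem _ _ _ hm]
      rw [ih (d.insert s (d.size : Int))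
        (PySem.Dict.nodup_keys_insert d s (d.size : Int) hnd)]
      rw [PySem.Dict.items_insert_of_not_contains d _ h',
        PySem.Dict.keys_insert_of_not_contains d _ h']
      have hsz : ((d.insert s (d.size : Int)).size : Int) = (d.size : Int) + 1 := by
        simp [PySem.Dict.size, PySem.Dict.items_insert_of_not_contains d _ h']
      rw [hsz]
      simp [pvNumb]

-- foldl of Set.add (= the dedup fold) from an accumulator appends the tokens fresh w.r.t. the accumulator
theorem pvOfList_eq_fresh (toks : List String) (acc : List String) :
    toks.foldl PySem.Set.add acc = acc ++ pvFresh acc toks := by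
  induction toks generalizing acc with
  | nil => simp [pvFresh]
  | cons s ss ih =>
    by_cases h : acc.contains s = true
    · simp only [List.foldl_cons, PySem.Set.add, PySem.Set.contains, h, if_true,
        pvFresh_cons_mem _ _ _ h]
      exact ih acc
    · have h' : acc.contains s = false := by simpa using h
      simp only [List.foldl_cons, PySem.Set.add, PySem.Set.contains, h', Bool.false_eq_true,
        if_false, pvFresh_cons_not_mem _ _ _ h']
      rw [ih (acc ++ [s])]
      simp

-- filtering a fresh-list by p equals running fresh with the ¬p-elements pre-seeded
theorem pvFilter_fresh (p : String → Bool) (toks : List String) :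
    ∀ (seen₁ seen₂ : List String),
      (∀ x, seen₂.contains x = (!p x || seen₁.contains x)) →
      (pvFresh seen₁ toks).filter p = pvFresh seen₂ toks := by
  induction toks with
  | nil => intro _ _ _; simp [pvFresh]
  | cons s ss ih =>
    intro seen₁ seen₂ hsp
    by_cases h2 : seen₂.contains s = true
    · rw [pvFresh_cons_mem _ _ _ h2]
      by_cases h1 : seen₁.contains s = true
      · rw [pvFresh_cons_mem _ _ _ h1]; exact ih seen₁ seen₂ hsp
      · have h1' : seen₁.contains s = false := by simpa using h1
        have hps : p s = false := by
          have := hsp s; rw [h2, h1'] at this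
          cases hp : p s
          · rfl
          · rw [hp] at this; simp at this
        rw [pvFresh_cons_not_mem _ _ _ h1']
        rw [List.filter_cons_of_neg (by simp [hps])]
        apply ih
        intro x
        have := hsp x
        simp only [List.contains_append, this]
        cases hx : (x == s)
        · have hne : x ≠ s := by simpa using hx
          simp [hne]
        · have hxe : x = s := by simpa using hx
          subst hxe
          simp [hps]
    · have h2' : seen₂.contains s = false := by simpa using h2
      have hsp' := hsp s
      rw [h2'] at hsp'
      have hps : p s = true := by
        cases hp : p s
        · rw [hp] at hsp'; simp at hsp'
        · rfl
      have h1' : seen₁.contains s = false := by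
        cases h1 : seen₁.contains s
        · rfl
        · rw [h1] at hsp'; simp at hsp'
      rw [pvFresh_cons_not_mem _ _ _ h1', pvFresh_cons_not_mem _ _ _ h2']
      rw [List.filter_cons_of_pos (by simp [hps])]
      congr 1
      apply ih
      intro x
      simp only [List.contains_append, hsp x]
      cases hx : (x == s) <;> simp [Bool.or_comm, Bool.or_left_comm]

-- enumerate-then-swap is consecutive numbering
theorem pvEnum_numb (l : List String) (n : Int) :
    (PySem.List.enumerate l n).map (fun p => (p.2, p.1)) = pvNumb n l := by
  induction l generalizing n with
  | nil => simp [PySem.List.enumerate, pvNumb]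
  | cons s ss ih => simp [PySem.List.enumerate_cons, pvNumb, ih]

-- B's stream-building fold is flatMap
theorem pvStream_eq (rows : List (List String × String)) (st0 : List String) :
    rows.foldl (fun st r => st ++ r.1 ++ [r.2]) st0
      = st0 ++ rows.flatMap (fun r => r.1 ++ [r.2]) := by
  induction rows generalizing st0 with
  | nil => simp
  | cons r rs ih => simp [List.flatMap]

-- A's nested fold is the fold over the flattened stream
theorem pvAfold_eq (rows : List (List String × String)) (d : PySem.Dict String Int) :
    rows.foldl (fun d r => pvStepA (r.1.foldl pvStepA d) r.2) d
      = (rows.flatMap (fun r => r.1 ++ [r.2])).foldl pvStepA d := by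
  induction rows generalizing d with
  | nil => simp
  | cons r rs ih =>
    simp only [List.foldl_cons, List.flatMap_cons, List.foldl_append]
    exact ih _

-- ===== VERDICT (by name: the statement is the Claim_ definition above) =====
theorem build_sid_vocab_spec : Claim_equal_build_sid_vocab := by
  intro rows _
  unfold Spec_build_sid_vocab build_sid_vocab build_sid_vocab_alt
  set d0 : PySem.Dict String Int := PySem.Dict.ofList [("<PAD>", 0), ("<UNK>", 1)] with hd0
  have hitems : d0.items = [("<PAD>", (0 : Int)), ("<UNK>", 1)] := by decide
  have hkeys : d0.keys = ["<PAD>", "<UNK>"] := by decide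
  have hnd : d0.keys.Nodup := by decide
  have hsz : (d0.size : Int) = 2 := by decide
  rw [pvAfold_eq, pvFoldA _ d0 hnd, hitems, hkeys, hsz, pvStream_eq, List.nil_append]
  congr 1
  rw [pvEnum_numb]
  congr 1
  simp only [PySem.List.dedup, PySem.Set.ofList]
  rw [pvOfList_eq_fresh]
  symm
  show List.filter _ ([] ++ pvFresh [] _) = _
  rw [List.nil_append]
  apply pvFilter_fresh
  intro x
  simp only [List.contains_nil, Bool.or_false]
  show _ = !(x != "<PAD>" && x != "<UNK>")
  cases h1 : (x == "<PAD>") <;> cases h2 : (x == "<UNK>") <;>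
    simp_all [bne]
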